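-- pv_equiv track=rewrite | github.com/muhammadhasyim/tps-diffusion-model | src/python/genai_tps/analysis/posebusters_traj.py | _pdb_lines_for_atom_subset
-- ===== SOURCE A (Python) =====
-- def _pdb_lines_for_atom_subset(
--     all_lines: list[str],
--     atom_indices: set[int],
-- ) -> str:
--     """Keep ATOM/HETATM lines whose running atom index is in ``atom_indices``."""
--     out: list[str] = []
--     i = 0
--     for line in all_lines:
--         if line.startswith(("ATOM", "HETATM")):
--             if i in atom_indices:
--                 out.append(line)
--             i += 1
--     return "\n".join(out) + "\nEND\n"
-- ===== SOURCE B (Python) =====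
-- def _pdb_lines_for_atom_subset(
--     all_lines: list[str],
--     atom_indices: set[int],
-- ) -> str:
--     """Index-driven version: walk the sorted index set and pull atoms[k] directly."""
--     atoms = [line for line in all_lines if line.startswith(("ATOM", "HETATM"))]
--     out = [atoms[k] for k in sorted(atom_indices) if 0 <= k < len(atoms)]
--     return "\n".join(out) + "\nEND\n"
-- ===== Notes on version B (the rewrite author's own statement) =====
-- stated objective: alternative
-- what changed: Instead of scanning every line with a running counter and a set-membership test per structural line, B sorts the index set once and selects by direct random access atoms[k] into the pre-filtered list, so membership tests disappear; correct because A emits lines in ascending running-index order, exactly the sorted order of the set.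
import Mathlib
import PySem

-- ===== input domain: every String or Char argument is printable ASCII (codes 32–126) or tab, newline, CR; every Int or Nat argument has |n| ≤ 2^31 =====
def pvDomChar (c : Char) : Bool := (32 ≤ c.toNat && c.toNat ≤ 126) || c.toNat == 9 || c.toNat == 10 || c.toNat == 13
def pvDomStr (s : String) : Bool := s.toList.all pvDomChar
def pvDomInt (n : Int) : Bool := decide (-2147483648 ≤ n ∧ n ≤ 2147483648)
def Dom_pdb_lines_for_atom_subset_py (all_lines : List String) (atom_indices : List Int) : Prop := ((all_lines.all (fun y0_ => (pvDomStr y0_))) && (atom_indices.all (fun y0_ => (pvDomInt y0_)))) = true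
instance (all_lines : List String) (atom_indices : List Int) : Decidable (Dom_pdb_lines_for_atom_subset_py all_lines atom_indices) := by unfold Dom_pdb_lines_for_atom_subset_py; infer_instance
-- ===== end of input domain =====

-- B replaces A's counted scan with membership tests by sorting the index set once and
-- pulling atoms[k] by direct random access from the pre-filtered list; alternative decomposition, same result.

-- ===== PORT A =====
-- A's single loop carrying (out, i); step for step.
def pdb_lines_for_atom_subset_py (all_lines : List String) (atom_indices : List Int) : String :=
  let st := all_lines.foldl
    (fun (st : List String × Int) line =>
      if PySem.Str.startswith line "ATOM" || PySem.Str.startswith line "HETATM" then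
        ((if atom_indices.contains st.2 then st.1 ++ [line] else st.1), st.2 + 1)
      else st)
    ([], 0)
  PySem.Str.join "\n" st.1 ++ "\nEND\n"

-- ===== PORT B =====
-- B: filter the structural lines, then walk sorted(atom_indices) and index atoms[k] directly.
def pdb_lines_for_atom_subset_py_alt (all_lines : List String) (atom_indices : List Int) : String :=
  let atoms := all_lines.filter
    (fun line => PySem.Str.startswith line "ATOM" || PySem.Str.startswith line "HETATM")
  let out := (PySem.List.sorted atom_indices (fun x => x) false).filterMap
    (fun k => if 0 ≤ k ∧ k < (atoms.length : Int) then PySem.List.pyGet? atoms k else none)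
  PySem.Str.join "\n" out ++ "\nEND\n"

-- ===== PRECONDITION & SPEC =====
-- atom_indices represents a Python set[int]: its List encoding holds distinct elements.
def Pre_pdb_lines_for_atom_subset_py (all_lines : List String) (atom_indices : List Int) : Prop :=
  atom_indices.Nodup
instance (all_lines : List String) (atom_indices : List Int) : Decidable (Pre_pdb_lines_for_atom_subset_py all_lines atom_indices) := by unfold Pre_pdb_lines_for_atom_subset_py; infer_instance

def pvWitness_pdb_lines_for_atom_subset_py : List String × List Int :=
  (["ATOM      1", "TER", "HETATM    2", "ATOM      3"], [0, 2, 5])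

def Spec_pdb_lines_for_atom_subset_py (all_lines : List String) (atom_indices : List Int) (out : String) : Prop := out = pdb_lines_for_atom_subset_py_alt all_lines atom_indices
instance (all_lines : List String) (atom_indices : List Int) (out : String) : Decidable (Spec_pdb_lines_for_atom_subset_py all_lines atom_indices out) := by unfold Spec_pdb_lines_for_atom_subset_py; infer_instance

-- ===== CLAIM (what is proved, stated in full; the proofs are below) =====
def Claim_equal_pdb_lines_for_atom_subset_py : Prop := ∀ (all_lines : List String) (atom_indices : List Int), Dom_pdb_lines_for_atom_subset_py all_lines atom_indices → Pre_pdb_lines_for_atom_subset_py all_lines atom_indices → Spec_pdb_lines_for_atom_subset_py all_lines atom_indices (pdb_lines_for_atom_subset_py all_lines atom_indices)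

-- ===== LEMMAS AND PROOFS =====

-- A's loop from state (acc, i) appends the filterMap of the enumerated filtered suffix.
theorem pdb_loop_eq (S : List Int) (ls : List String) :
    ∀ (acc : List String) (i : Int),
      ls.foldl
        (fun (st : List String × Int) line =>
          if PySem.Str.startswith line "ATOM" || PySem.Str.startswith line "HETATM" then
            ((if S.contains st.2 then st.1 ++ [line] else st.1), st.2 + 1)
          else st)
        (acc, i)
      = (acc ++ (PySem.List.enumerate
            (ls.filter (fun line => PySem.Str.startswith line "ATOM" || PySem.Str.startswith line "HETATM")) i).filterMap
            (fun p => if S.contains p.1 then some p.2 else none),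
         i + (ls.filter (fun line => PySem.Str.startswith line "ATOM" || PySem.Str.startswith line "HETATM")).length) := by
  induction ls with
  | nil => intro acc i; simp [PySem.List.enumerate_nil]
  | cons l t ih =>
    intro acc i
    by_cases h : (PySem.Str.startswith l "ATOM" || PySem.Str.startswith l "HETATM") = true
    · simp only [List.foldl_cons, List.filter_cons, h, if_true, PySem.List.enumerate_cons,
        List.filterMap_cons]
      rw [ih]
      by_cases hm : S.contains i = true
      · simp only [hm, if_true, List.length_cons]
        refine Prod.ext ?_ ?_
        · simp [List.append_assoc]
        · simp; ring
      · simp only [hm, if_false, Bool.false_eq_true, List.length_cons]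
        refine Prod.ext ?_ ?_
        · simp
        · simp; ring
    · simp only [Bool.not_eq_true] at h
      simp only [List.foldl_cons, List.filter_cons, h, Bool.false_eq_true, if_false]
      exact ih acc i

-- stepping the window: on a strictly increasing index list, selecting from (a :: t) at base i
-- splits into the possible hit at i plus selection from t at base i+1.
theorem pick_step (a : String) (t : List String) :
    ∀ (l : List Int), l.Pairwise (· < ·) → ∀ (i : Int),
      l.filterMap (fun k => if i ≤ k ∧ k < i + ((t.length : Int) + 1) then PySem.List.pyGet? (a :: t) (k - i) else none)
      = (if l.contains i then [a] else []) ++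
        l.filterMap (fun k => if i + 1 ≤ k ∧ k < (i + 1) + (t.length : Int) then PySem.List.pyGet? t (k - (i + 1)) else none) := by
  intro l hl
  induction l with
  | nil => intro i; simp
  | cons h t' ih =>
    have hlt : ∀ x ∈ t', h < x := fun x hx => List.rel_of_pairwise_cons hl hx
    have htail := ih (List.Pairwise.of_cons hl)
    intro i
    have hgt_eq : ∀ k : Int, i < k →
        (if i ≤ k ∧ k < i + ((t.length : Int) + 1) then PySem.List.pyGet? (a :: t) (k - i) else none)
        = (if i + 1 ≤ k ∧ k < (i + 1) + (t.length : Int) then PySem.List.pyGet? t (k - (i + 1)) else none) := by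
      intro k hk
      by_cases hub : k < i + ((t.length : Int) + 1)
      · rw [if_pos (⟨le_of_lt hk, hub⟩ : i ≤ k ∧ k < i + ((t.length : Int) + 1)),
          if_pos (⟨by omega, by omega⟩ : i + 1 ≤ k ∧ k < (i + 1) + (t.length : Int))]
        have hk1 : k - i = ((k - i - 1).toNat : Int) + 1 := by omega
        rw [hk1, PySem.List.pyGet?_cons_succ]
        congr 1
        omega
      · rw [if_neg (by omega), if_neg (by omega)]
    rcases lt_trichotomy h i with hc | hc | hc
    · -- head below the window: contributes nothing to either side
      have h1 : ¬ (i ≤ h ∧ h < i + ((t.length : Int) + 1)) := by omega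
      have h2 : ¬ (i + 1 ≤ h ∧ h < (i + 1) + (t.length : Int)) := by omega
      have hne : (i == h) = false := by simp; omega
      simp only [List.filterMap_cons, if_neg h1, if_neg h2, List.contains_cons, hne, Bool.false_or]
      exact htail i
    · -- head is exactly i: the hit
      subst hc
      have h1 : h ≤ h ∧ h < h + ((t.length : Int) + 1) := ⟨le_refl _, by omega⟩
      have h2 : ¬ (h + 1 ≤ h ∧ h < (h + 1) + (t.length : Int)) := by omega
      have hget : PySem.List.pyGet? (a :: t) (h - h) = some a := by simp
      simp only [List.filterMap_cons, if_pos h1, if_neg h2, hget, List.contains_cons, BEq.refl,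
        Bool.true_or, if_true]
      rw [List.filterMap_congr (fun k hk => hgt_eq k (hlt k hk))]
      rfl
    · -- head above i: all of the list is above i
      have hcont : ((h :: t').contains i) = false := by
        simp only [List.contains_eq_mem, decide_eq_false_iff_not]
        intro hmem
        rcases List.mem_cons.mp hmem with he | hm
        · omega
        · exact absurd (hlt i hm) (by omega)
      rw [List.filterMap_congr (fun k hk => hgt_eq k (by
        rcases List.mem_cons.mp hk with he | hm
        · omega
        · exact lt_trans hc (hlt k hm)))]
      simp only [hcont, Bool.false_eq_true, if_false, List.nil_append]

-- whole selection: enumerate-and-test over atoms equals walking the sorted index list with random access.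
theorem sel_eq (atoms : List String) :
    ∀ (l : List Int), l.Pairwise (· < ·) → ∀ (i : Int),
      (PySem.List.enumerate atoms i).filterMap (fun p => if l.contains p.1 then some p.2 else none)
      = l.filterMap (fun k => if i ≤ k ∧ k < i + (atoms.length : Int) then PySem.List.pyGet? atoms (k - i) else none) := by
  induction atoms with
  | nil =>
    intro l hl i
    have hnil : l.filterMap (fun k => if i ≤ k ∧ k < i + (([] : List String).length : Int) then PySem.List.pyGet? ([] : List String) (k - i) else none) = [] := by
      rw [List.filterMap_eq_nil_iff]
      intro k _
      have hno : ¬ (i ≤ k ∧ k < i + (([] : List String).length : Int)) := by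
        simp only [List.length_nil, Int.natCast_zero]
        omega
      rw [if_neg hno]
    rw [hnil]
    simp [PySem.List.enumerate_nil]
  | cons a t ih =>
    intro l hl i
    rw [PySem.List.enumerate_cons, List.filterMap_cons]
    have step := pick_step a t l hl i
    have hlen : ((a :: t).length : Int) = (t.length : Int) + 1 := by simp
    rw [hlen, step]
    by_cases hm : l.contains i = true
    · simp only [hm, if_true]
      rw [ih l hl (i + 1)]
      rfl
    · simp only [hm, Bool.false_eq_true, if_false]
      rw [ih l hl (i + 1)]
      rfl

-- sorted of a nodup list is strictly increasing.
theorem sorted_nodup_pairwise_lt (S : List Int) (h : S.Nodup) :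
    (PySem.List.sorted S (fun x => x) false).Pairwise (· < ·) := by
  have hperm : (PySem.List.sorted S (fun x => x) false).Perm S := PySem.List.sorted_perm S (fun x => x) false
  have hnd : (PySem.List.sorted S (fun x => x) false).Nodup := hperm.nodup_iff.mpr h
  have hle : (PySem.List.sorted S (fun x => x) false).Pairwise (fun a b => a ≤ b) := by
    simpa using PySem.List.sorted_pairwise S (fun x => x)
  exact (hle.and hnd).imp (fun h => lt_of_le_of_ne h.1 h.2)

-- ===== VERDICT (by name: the statement is the Claim_ definition above) =====
theorem pdb_lines_for_atom_subset_py_spec : Claim_equal_pdb_lines_for_atom_subset_py := by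
  intro all_lines S _ hpre
  unfold Spec_pdb_lines_for_atom_subset_py pdb_lines_for_atom_subset_py pdb_lines_for_atom_subset_py_alt
  rw [pdb_loop_eq]
  set atoms := all_lines.filter (fun line => PySem.Str.startswith line "ATOM" || PySem.Str.startswith line "HETATM") with hatoms
  set l := PySem.List.sorted S (fun x => x) false with hlk
  have hpl : l.Pairwise (· < ·) := sorted_nodup_pairwise_lt S hpre
  have hcont : ∀ x : Int, S.contains x = l.contains x := by
    intro x
    have hmem : x ∈ S ↔ x ∈ l := ((PySem.List.sorted_perm S (fun x => x) false).mem_iff).symm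
    simp only [List.contains_eq_mem]
    exact decide_eq_decide.mpr hmem
  simp only [List.nil_append]
  rw [List.filterMap_congr (g := fun p : Int × String => if l.contains p.1 then some p.2 else none)
    (fun p _ => by rw [hcont p.1])]
  rw [sel_eq atoms l hpl 0]
  congr 1
  congr 1
  apply List.filterMap_congr
  intro k _
  by_cases hk : 0 ≤ k ∧ k < (atoms.length : Int)
  · rw [if_pos (by omega : 0 ≤ k ∧ k < 0 + (atoms.length : Int)), if_pos hk]
    have hk0 : k - 0 = k := by ring
    rw [hk0]
  · rw [if_neg (by omega), if_neg hk]
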